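-- pv_equiv track=rewrite | github.com/mamg22/pympd-notifier | pympd-status.py | parse_fmt_str
-- ===== SOURCE A (Python) =====
-- import string
--
-- def expand(argument, information):
--     return information.get(argument, "")
--
-- def format_state_ncmpcpp(argument, information):
--     out = "[ "
--     flags = [ ("repeat",  "r "),
--               ("random",  "z "),
--               ("single",  "s "),
--               ("consume", "c "),
--               ("xfade",   "x ")
--             ]
--     for flag in flags:
--         if information[flag[0]] == "0":
--             out += "- "
--         else:
--             out += flag[1]
--     return out + "]"
--
-- def echo(argument, information):
--     return arg
--
-- def parse_fmt_str(fmt_str, information):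
--     # format: $function{argument}
--     # ${} is an alias for $expand{}
--     # TODO: Wrap this in an object, so it can have a mapping of functions (maybe)
--     out = ""
--     mode = "normal"
--     name = "" # Variable or function name
--     argument = "" # function argument
--     escape = False
--     functions = {
--         "": expand,
--         "expand": expand,
--         "ncmpcpp_state": format_state_ncmpcpp,
--         "echo": echo,
--         }
--     for char in fmt_str:
--         if mode == "normal":
--             if not escape:
--                 if char == "$":
--                     mode = "read_name"
--                 elif char == "\\":
--                     escape = True
--                 else:
--                     out += char
--             else:
--                 out += char
--                 escape = False
--         elif mode == "read_name":
--             if not escape: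
--                 if char in string.ascii_letters + string.digits + "_":
--                     # Names are only [a-zA-Z0-9_]
--                     name += char
--                 elif char == "{":
--                     mode = "read_arg"
--                 else:
--                     out += expand(name, information)
--                     if char == "\\":
--                         escape = True
--                     else:
--                         out += char
--                     name = ""
--                     mode = "normal"
--             else:
--                 out += expand(name, information) + char
--                 name = ""
--                 mode = "normal"
--
--         elif mode == "read_arg":
--             if not escape:
--                 if char == "}":
--                     out += functions[name](argument, information)
--                     mode = "normal"
--                     name = ""
--                     argument = ""
--                 else:
--                     if char == "\\":
--                         escape = True
--                     else:
--                         argument += char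
--             else:
--                 argument += char
--                 escape = False
--         else:
--             out += char
--             escape = False
--     # Expand remaining variable, if any
--     if mode == "read_name":
--         out += expand(name, information)
--     return out
-- ===== SOURCE B (Python) =====
-- # Index-driven scanner: while-loop over a cursor with greedy identifier/argument
-- # consumption, instead of A's per-character mode/escape state machine.
--
-- def expand(argument, information):
--     return information.get(argument, "")
--
-- def format_state_ncmpcpp(argument, information):
--     flags = [("repeat", "r "), ("random", "z "), ("single", "s "),
--              ("consume", "c "), ("xfade", "x ")]
--     return "[ " + "".join("- " if information[k] == "0" else mark
--                           for k, mark in flags) + "]"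
--
-- def parse_fmt_str(fmt_str, information):
--     dispatch = {"": expand, "expand": expand, "ncmpcpp_state": format_state_ncmpcpp}
--     n = len(fmt_str)
--     out = []
--     i = 0
--     while i < n:
--         c = fmt_str[i]
--         if c == '\\':
--             if i + 1 < n:
--                 out.append(fmt_str[i + 1])
--             i += 2
--         elif c != '$':
--             out.append(c)
--             i += 1
--         else:
--             i += 1
--             start = i
--             while i < n and (fmt_str[i].isalnum() or fmt_str[i] == '_'):
--                 i += 1
--             name = fmt_str[start:i]
--             if i < n and fmt_str[i] == '{':
--                 i += 1
--                 arg = []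
--                 closed = False
--                 while i < n:
--                     d = fmt_str[i]
--                     if d == '}':
--                         i += 1
--                         closed = True
--                         break
--                     if d == '\\':
--                         if i + 1 < n:
--                             arg.append(fmt_str[i + 1])
--                         i += 2
--                     else:
--                         arg.append(d)
--                         i += 1
--                 if closed:
--                     out.append(dispatch[name]("".join(arg), information))
--                 # an unterminated argument is dropped silently
--             else:
--                 out.append(expand(name, information))
--                 if i < n:
--                     if fmt_str[i] == '\\':
--                         if i + 1 < n:
--                             out.append(fmt_str[i + 1])
--                         i += 2
--                     else:
--                         out.append(fmt_str[i])
--                         i += 1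
--     return "".join(out)
-- ===== Notes on version B (the rewrite author's own statement) =====
-- stated objective: alternative
-- what changed: Replaced A's per-character mode-string/escape-flag state machine (one fold with 5 state variables and a final flush) with an index-driven scanner: a cursor-based outer loop that eats backslash escapes two characters at a time, greedily consumes a maximal [a-zA-Z0-9_] identifier run after '$' in an inner loop, and parses a '{...}' argument in a dedicated inner loop, so no mode flag, escape flag, or end-of-string flush exists. …
-- outside the precondition, e.g. on parse_fmt_str('\\$echo{x}', {}): A returns '$echo{x}', B returns '$echo{x}'; on parse_fmt_str('$expand{a\\$echo{b}', {}): A returns '', B returns ''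
import Mathlib
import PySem

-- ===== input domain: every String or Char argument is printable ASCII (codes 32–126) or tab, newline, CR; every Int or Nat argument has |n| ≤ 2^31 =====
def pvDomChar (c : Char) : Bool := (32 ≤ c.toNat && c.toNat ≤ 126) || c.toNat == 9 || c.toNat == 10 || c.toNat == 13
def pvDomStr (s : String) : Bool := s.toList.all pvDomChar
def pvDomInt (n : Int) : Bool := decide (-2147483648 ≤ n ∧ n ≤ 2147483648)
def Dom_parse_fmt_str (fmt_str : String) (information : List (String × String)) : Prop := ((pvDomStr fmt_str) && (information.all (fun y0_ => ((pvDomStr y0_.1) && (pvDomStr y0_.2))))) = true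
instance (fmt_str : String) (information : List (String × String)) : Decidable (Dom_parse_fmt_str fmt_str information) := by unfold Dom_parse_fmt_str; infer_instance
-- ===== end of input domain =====

-- B is an index-driven scanner (greedy identifier/argument consumption, escapes eaten two
-- chars at a time) instead of A's per-character mode/escape state machine; same return value.

-- shared helpers (both Pythons contain identical `expand`; name chars are [a-zA-Z0-9_])
def pvNameChar (c : Char) : Bool := c.isAlpha || c.isDigit || c == '_'

-- information.get(argument, "")  (dict lookup with default)
def pvExpand (argument : List Char) (information : List (String × String)) : List Char :=
  (PySem.Dict.getD ⟨information⟩ (String.mk argument) "").toList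

def pvFlags : List (String × String) :=
  [("repeat", "r "), ("random", "z "), ("single", "s "), ("consume", "c "), ("xfade", "x ")]

-- ===== PORT A =====
-- A's format_state_ncmpcpp: out = "[ "; for flag in flags: out += …; return out + "]"
-- (information[flag[0]] raises KeyError when the key is missing: that input is outside
--  Pre_; the port returns "- " there, a junk value the claim never reaches)
def pvFormatStateA (argument : List Char) (information : List (String × String)) : List Char :=
  (pvFlags.foldl (fun out flag => out ++
      (match PySem.Dict.get? ⟨information⟩ flag.1 with
       | some v => if v = "0" then ['-', ' '] else flag.2.toList
       | none => ['-', ' '])) ['[', ' ']) ++ [']']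

-- A's functions dict: {"": expand, "expand": expand, "ncmpcpp_state": …, "echo": echo}.
-- "echo" raises NameError when called and a missing key raises KeyError: both outside
-- Pre_; the port returns [] there (junk, never reached by the claim).
def pvCallA (name argument : List Char) (information : List (String × String)) : List Char :=
  if name = [] then pvExpand argument information
  else if name = "expand".toList then pvExpand argument information
  else if name = "ncmpcpp_state".toList then pvFormatStateA argument information
  else []

structure PvStA where
  out : List Char
  mode : String
  name : List Char
  argument : List Char
  escape : Bool

def pvStepA (information : List (String × String)) (s : PvStA) (char : Char) : PvStA :=
  if s.mode = "normal" then
    if !s.escape then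
      if char = '$' then { s with mode := "read_name" }
      else if char = '\\' then { s with escape := true }
      else { s with out := s.out ++ [char] }
    else { s with out := s.out ++ [char], escape := false }
  else if s.mode = "read_name" then
    if !s.escape then
      if pvNameChar char then { s with name := s.name ++ [char] }
      else if char = '{' then { s with mode := "read_arg" }
      else if char = '\\' then
        { s with out := s.out ++ pvExpand s.name information, escape := true, name := [], mode := "normal" }
      else
        { s with out := s.out ++ pvExpand s.name information ++ [char], name := [], mode := "normal" }
    else
      { s with out := s.out ++ pvExpand s.name information ++ [char], name := [], mode := "normal" }
  else if s.mode = "read_arg" then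
    if !s.escape then
      if char = '}' then
        { s with out := s.out ++ pvCallA s.name s.argument information, mode := "normal", name := [], argument := [] }
      else if char = '\\' then { s with escape := true }
      else { s with argument := s.argument ++ [char] }
    else { s with argument := s.argument ++ [char], escape := false }
  else { s with out := s.out ++ [char], escape := false }

def parse_fmt_str (fmt_str : String) (information : List (String × String)) : String :=
  let fin := fmt_str.toList.foldl (pvStepA information) ⟨[], "normal", [], [], false⟩
  String.mk (if fin.mode = "read_name" then fin.out ++ pvExpand fin.name information else fin.out)

-- ===== PORT B =====
-- B's format_state_ncmpcpp: "[ " + "".join(… for k, mark in flags) + "]"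
def pvFormatStateB (argument : List Char) (information : List (String × String)) : List Char :=
  ['[', ' '] ++
    (pvFlags.map (fun p =>
      match PySem.Dict.get? ⟨information⟩ p.1 with
      | some v => if v = "0" then ['-', ' '] else p.2.toList
      | none => ['-', ' '])).flatten ++ [']']

-- B's dispatch dict {"": expand, "expand": expand, "ncmpcpp_state": …}; a missing key
-- raises KeyError in Python (outside Pre_); the port returns [] there.
def pvCallB (name argument : List Char) (information : List (String × String)) : List Char :=
  if name = [] then pvExpand argument information
  else if name = "expand".toList then pvExpand argument information
  else if name = "ncmpcpp_state".toList then pvFormatStateB argument information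
  else []

-- the three phases of B's while-loop, as recursion over the remaining suffix:
-- pvNorm = outer loop, pvName = identifier run, pvArg = argument loop
mutual
def pvNorm (information : List (String × String)) (cs : List Char) : List Char :=
  match cs with
  | [] => []
  | c :: rest =>
    if c = '\\' then
      match rest with
      | [] => []
      | d :: rest' => d :: pvNorm information rest'
    else if c = '$' then pvName information rest []
    else c :: pvNorm information rest
termination_by cs.length

def pvName (information : List (String × String)) (cs : List Char) (name : List Char) : List Char :=
  match cs with
  | [] => pvExpand name information
  | c :: rest =>
    if pvNameChar c then pvName information rest (name ++ [c])
    else if c = '{' then pvArg information rest name []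
    else if c = '\\' then
      pvExpand name information ++
        (match rest with
         | [] => []
         | d :: rest' => d :: pvNorm information rest')
    else pvExpand name information ++ c :: pvNorm information rest
termination_by cs.length

def pvArg (information : List (String × String)) (cs : List Char) (name arg : List Char) : List Char :=
  match cs with
  | [] => []
  | c :: rest =>
    if c = '}' then pvCallB name arg information ++ pvNorm information rest
    else if c = '\\' then
      match rest with
      | [] => []
      | d :: rest' => pvArg information rest' name (arg ++ [d])
    else pvArg information rest name (arg ++ [c])
termination_by cs.length
end

def parse_fmt_str_alt (fmt_str : String) (information : List (String × String)) : String :=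
  String.mk (pvNorm information fmt_str.toList)

-- ===== PRECONDITION & SPEC =====
-- Pre_ excludes the inputs on which A raises — a completed "$name{…}" whose name is
-- "echo" (NameError: undefined `arg`), unknown (KeyError in the functions dict), or
-- "ncmpcpp_state" without all five flag keys (KeyError) — stated as the closed-form
-- pattern '$' + identifier run + '{' over the raw string; this is slightly narrower than
-- A's domain (it also rejects such a pattern when it sits escaped or inside another
-- argument, where A still returns; B returns the same value there).
def pvSafeName (name : List Char) (information : List (String × String)) : Bool :=
  name == [] || name == "expand".toList ||
    (name == "ncmpcpp_state".toList &&
      (["repeat", "random", "single", "consume", "xfade"].all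
        (fun k => (PySem.Dict.get? ⟨information⟩ k).isSome)))

def Pre_parse_fmt_str (fmt_str : String) (information : List (String × String)) : Prop :=
  ∀ t ∈ fmt_str.toList.tails, t.head? = some '$' →
    (((t.drop 1).drop ((t.drop 1).takeWhile pvNameChar).length).head? = some '{') →
    pvSafeName ((t.drop 1).takeWhile pvNameChar) information = true

instance (fmt_str : String) (information : List (String × String)) : Decidable (Pre_parse_fmt_str fmt_str information) := by unfold Pre_parse_fmt_str; infer_instance

def pvWitness_parse_fmt_str : String × (List (String × String)) :=
  ("now: $expand{song} by $artist\\!", [("song", "S"), ("artist", "A")])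

def Spec_parse_fmt_str (fmt_str : String) (information : List (String × String)) (out : String) : Prop := out = parse_fmt_str_alt fmt_str information
instance (fmt_str : String) (information : List (String × String)) (out : String) : Decidable (Spec_parse_fmt_str fmt_str information out) := by unfold Spec_parse_fmt_str; infer_instance

-- ===== CLAIM (what is proved, stated in full; the proofs are below) =====
def Claim_equal_parse_fmt_str : Prop := ∀ (fmt_str : String) (information : List (String × String)), Dom_parse_fmt_str fmt_str information → Pre_parse_fmt_str fmt_str information → Spec_parse_fmt_str fmt_str information (parse_fmt_str fmt_str information)

-- ===== LEMMAS AND PROOFS =====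

lemma pvWitness_ok : Dom_parse_fmt_str pvWitness_parse_fmt_str.1 pvWitness_parse_fmt_str.2 ∧
    Pre_parse_fmt_str pvWitness_parse_fmt_str.1 pvWitness_parse_fmt_str.2 := by decide

-- the two ports' format_state helpers compute the same list
lemma pvFormatState_eq (argument : List Char) (information : List (String × String)) :
    pvFormatStateA argument information = pvFormatStateB argument information := by
  unfold pvFormatStateA pvFormatStateB
  rw [PySem.List.foldl_append_eq_flatMap]
  simp [List.flatMap_def]

lemma pvCall_eq (name argument : List Char) (information : List (String × String)) :
    pvCallA name argument information = pvCallB name argument information := by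
  simp only [pvCallA, pvCallB, pvFormatState_eq]

-- A's final fixup ("expand remaining variable, if any")
def pvFinishA (information : List (String × String)) (s : PvStA) : List Char :=
  if s.mode = "read_name" then s.out ++ pvExpand s.name information else s.out

-- the central invariant: from each of A's loop states, running A's fold over the rest of
-- the input and finishing computes `out ++ <the matching phase of B on the suffix>`
lemma pvMain (information : List (String × String)) :
    ∀ (n : Nat) (cs : List Char), cs.length ≤ n →
      ((∀ out, pvFinishA information (cs.foldl (pvStepA information) ⟨out, "normal", [], [], false⟩)
          = out ++ pvNorm information cs)
       ∧ (∀ out name, pvFinishA information (cs.foldl (pvStepA information) ⟨out, "read_name", name, [], false⟩)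
          = out ++ pvName information cs name)
       ∧ (∀ out name arg, pvFinishA information (cs.foldl (pvStepA information) ⟨out, "read_arg", name, arg, false⟩)
          = out ++ pvArg information cs name arg)) := by
  intro n
  induction n with
  | zero =>
    intro cs hcs
    have : cs = [] := List.eq_nil_of_length_eq_zero (Nat.le_zero.mp hcs)
    subst this
    refine ⟨?_, ?_, ?_⟩ <;> intros <;>
      simp [pvFinishA, pvNorm, pvName, pvArg]
  | succ n ih =>
    intro cs hcs
    match cs with
    | [] =>
      refine ⟨?_, ?_, ?_⟩ <;> intros <;>
        simp [pvFinishA, pvNorm, pvName, pvArg]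
    | c :: rest =>
      have hrest : rest.length ≤ n := by simpa using Nat.succ_le_succ_iff.mp hcs
      refine ⟨?_, ?_, ?_⟩
      · intro out
        rw [pvNorm.eq_def]
        by_cases h1 : c = '$'
        · subst h1
          simpa [pvStepA] using (ih rest hrest).2.1 out []
        · by_cases h2 : c = '\\'
          · subst h2
            match rest with
            | [] => simp [pvStepA, pvFinishA]
            | d :: rest' =>
              have h' : rest'.length ≤ n := by simp at hrest; omega
              simpa [pvStepA, List.append_assoc] using (ih rest' h').1 (out ++ [d])
          · simpa [pvStepA, h1, h2, List.append_assoc] using (ih rest hrest).1 (out ++ [c])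
      · intro out name
        rw [pvName.eq_def]
        by_cases h1 : pvNameChar c
        · simpa [pvStepA, h1] using (ih rest hrest).2.1 out (name ++ [c])
        · by_cases h2 : c = '{'
          · subst h2
            simpa [pvStepA, h1] using (ih rest hrest).2.2 out name []
          · by_cases h3 : c = '\\'
            · subst h3
              match rest with
              | [] => simp [pvStepA, pvFinishA, h1]
              | d :: rest' =>
                have h' : rest'.length ≤ n := by simp at hrest; omega
                simpa [pvStepA, h1, List.append_assoc] using
                  (ih rest' h').1 (out ++ pvExpand name information ++ [d])
            · simpa [pvStepA, h1, h2, h3, List.append_assoc] using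
                (ih rest hrest).1 (out ++ pvExpand name information ++ [c])
      · intro out name arg
        rw [pvArg.eq_def]
        by_cases h1 : c = '}'
        · subst h1
          simpa [pvStepA, pvCall_eq, List.append_assoc] using
            (ih rest hrest).1 (out ++ pvCallB name arg information)
        · by_cases h2 : c = '\\'
          · subst h2
            match rest with
            | [] => simp [pvStepA, pvFinishA, h1]
            | d :: rest' =>
              have h' : rest'.length ≤ n := by simp at hrest; omega
              simpa [pvStepA, h1] using (ih rest' h').2.2 out name (arg ++ [d])
          · simpa [pvStepA, h1, h2] using (ih rest hrest).2.2 out name (arg ++ [c])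

-- ===== VERDICT (by name: the statement is the Claim_ definition above) =====
theorem parse_fmt_str_spec : Claim_equal_parse_fmt_str := by
  intro fmt_str information _hdom _hpre
  unfold Spec_parse_fmt_str parse_fmt_str parse_fmt_str_alt
  have h := ((pvMain information fmt_str.toList.length fmt_str.toList le_rfl).1 [])
  simp only [pvFinishA] at h
  simp [h]
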